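-- pv_equiv track=rewrite | github.com/Maksydenko/Practices | practice-10-01/main.py | sort_half
-- ===== SOURCE A (Python) =====
-- def sort_half(array):
--     full_len = len(array)
--     half_len = len(array) // 2
--
--     for i in range(half_len - 1):
--         min = i
--
--         for j in range(i + 1, half_len):
--             if array[j] < array[min]:
--                 min = j
--         array[i], array[min] = array[min], array[i]
--     for i in range(half_len, full_len - 1):
--         min = i
--
--         for j in range(i + 1, full_len):
--             if array[j] > array[min]:
--                 min = j
--         array[i], array[min] = array[min], array[i]
--     return array
-- ===== SOURCE B (Python) =====
-- def sort_half(array):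
--     half = len(array) // 2
--     array[:half] = sorted(array[:half])
--     array[half:] = sorted(array[half:], reverse=True)
--     return array
-- ===== Notes on version B (the rewrite author's own statement) =====
-- stated objective: faster
-- what changed: Replaces the two hand-written quadratic selection-sort passes with two calls to Python's built-in Timsort on the half slices (ascending / descending) assigned back in place.
import Mathlib
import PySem

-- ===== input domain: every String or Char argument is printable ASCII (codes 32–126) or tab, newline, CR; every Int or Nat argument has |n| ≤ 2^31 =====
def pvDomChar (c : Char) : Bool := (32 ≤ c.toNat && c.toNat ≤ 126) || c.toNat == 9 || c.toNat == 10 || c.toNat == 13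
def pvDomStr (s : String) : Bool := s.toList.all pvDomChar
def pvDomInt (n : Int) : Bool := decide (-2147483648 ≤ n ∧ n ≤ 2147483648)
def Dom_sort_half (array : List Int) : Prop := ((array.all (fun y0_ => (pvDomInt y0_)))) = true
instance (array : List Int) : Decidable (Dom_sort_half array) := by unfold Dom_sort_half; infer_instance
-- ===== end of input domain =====

-- B replaces A's two quadratic selection-sort passes by built-in sorts of the two half slices.
-- (In Python, A sorts its argument in place and B assigns the sorted slices back into the same
-- list object; the equivalence proved here is about the return value.)

-- ===== PORT A =====
-- literal port of A: two selection-sort passes over index ranges, swap via simultaneous assignment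
def sort_half (array : List Int) : List Int :=
  let full_len : Int := array.length
  let half_len : Int := PySem.Int.floordiv full_len 2
  let a1 := (PySem.List.pyRange 0 (half_len - 1) 1).foldl (fun a i =>
      let m := (PySem.List.pyRange (i + 1) half_len 1).foldl
        (fun m j => if PySem.List.pyGetD a j 0 < PySem.List.pyGetD a m 0 then j else m) i
      PySem.List.pySetD (PySem.List.pySetD a i (PySem.List.pyGetD a m 0)) m
        (PySem.List.pyGetD a i 0)) array
  (PySem.List.pyRange half_len (full_len - 1) 1).foldl (fun a i =>
      let m := (PySem.List.pyRange (i + 1) full_len 1).foldl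
        (fun m j => if PySem.List.pyGetD a j 0 > PySem.List.pyGetD a m 0 then j else m) i
      PySem.List.pySetD (PySem.List.pySetD a i (PySem.List.pyGetD a m 0)) m
        (PySem.List.pyGetD a i 0)) a1


-- ===== PORT B =====
-- literal port of B: built-in sorted() of the two slices, ascending then descending
def sort_half_alt (array : List Int) : List Int :=
  let half : Int := PySem.Int.floordiv (array.length : Int) 2
  let first := PySem.List.sorted (PySem.List.slice array none (some half)) (fun x => x) false
  let second := PySem.List.sorted (PySem.List.slice array (some half) none) (fun x => x) true
  first ++ second


-- ===== PRECONDITION & SPEC =====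
def Spec_sort_half (array : List Int) (out : List Int) : Prop := out = sort_half_alt array
instance (array : List Int) (out : List Int) : Decidable (Spec_sort_half array out) := by unfold Spec_sort_half; infer_instance

-- ===== CLAIM (what is proved, stated in full; the proofs are below) =====
def Claim_equal_sort_half : Prop := ∀ (array : List Int), Dom_sort_half array → Spec_sort_half array (sort_half array)

-- ===== LEMMAS AND PROOFS =====
-- Nat-level reformulation of one selection pass, parametric in the comparison, with the
-- two Bool comparisons used by the two passes
def ltAsc (x y : Int) : Bool := decide (x < y)
def ltDesc (x y : Int) : Bool := decide (y < x)

def amin (lt : Int → Int → Bool) (a : List Int) (m : Nat) (js : List Nat) : Nat :=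
  js.foldl (fun m j => if lt (a.getD j 0) (a.getD m 0) then j else m) m

theorem amin_mem (lt : Int → Int → Bool) (a : List Int) (m : Nat) (js : List Nat) :
    amin lt a m js ∈ m :: js := by
  induction js generalizing m with
  | nil => simp [amin]
  | cons j js ih =>
    simp only [amin, List.foldl_cons]
    cases hb : lt (a.getD j 0) (a.getD m 0) with
    | true =>
      rw [if_pos rfl]
      have := ih j
      simp only [amin] at this
      rcases List.mem_cons.mp this with h1 | h1
      · rw [h1]; exact List.mem_cons.mpr (Or.inr (List.mem_cons_self ..))
      · exact List.mem_cons.mpr (Or.inr (List.mem_cons.mpr (Or.inr h1)))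
    | false =>
      rw [if_neg (by simp)]
      have := ih m
      simp only [amin] at this
      rcases List.mem_cons.mp this with h1 | h1
      · rw [h1]; exact List.mem_cons_self ..
      · exact List.mem_cons.mpr (Or.inr (List.mem_cons.mpr (Or.inr h1)))

theorem amin_min (lt : Int → Int → Bool) (a : List Int)
    (hirr : ∀ x, lt x x = false)
    (h2 : ∀ x y z, lt x y = true → lt x z = false → lt y z = false)
    (h3 : ∀ x y z, lt x y = false → lt y z = false → lt x z = false)
    (m : Nat) (js : List Nat) :
    ∀ j ∈ m :: js, lt (a.getD j 0) (a.getD (amin lt a m js) 0) = false := by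
  induction js generalizing m with
  | nil => intro j hj; simp at hj; subst hj; simpa [amin] using hirr _
  | cons j' js ih =>
    intro j hj
    simp only [amin, List.foldl_cons]
    cases hb : lt (a.getD j' 0) (a.getD m 0) with
    | true =>
      rw [if_pos rfl]
      rcases List.mem_cons.mp hj with rfl | hj1
      · have hj'r := ih j' j' (List.mem_cons_self ..)
        simp only [amin] at hj'r
        exact h2 _ _ _ hb hj'r
      · exact ih j' j hj1
    | false =>
      rw [if_neg (by simp)]
      rcases List.mem_cons.mp hj with rfl | hj1
      · exact ih j j (List.mem_cons_self ..)
      · rcases List.mem_cons.mp hj1 with rfl | hj2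
        · have hmr := ih m m (List.mem_cons_self ..)
          simp only [amin] at hmr
          exact h3 _ _ _ hb hmr
        · exact ih m j (List.mem_cons.mpr (Or.inr hj2))

def sstep (lt : Int → Int → Bool) (a : List Int) (i : Nat) : List Int :=
  let m := amin lt a i (List.range' (i + 1) (a.length - (i + 1)))
  (a.set i (a.getD m 0)).set m (a.getD i 0)

def spass (lt : Int → Int → Bool) (a : List Int) : List Int :=
  (List.range' 0 (a.length - 1)).foldl (sstep lt) a

theorem range'_shift (s n : Nat) : List.range' (s + 1) n = (List.range' s n).map (· + 1) := by
  induction n generalizing s with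
  | zero => simp
  | succ n ih => rw [List.range'_succ, List.range'_succ, List.map_cons, ih]

theorem amin_shift (lt : Int → Int → Bool) (v : Int) (r : List Int) (m : Nat) (js : List Nat) :
    amin lt (v :: r) (m + 1) (js.map (· + 1)) = amin lt r m js + 1 := by
  induction js generalizing m with
  | nil => simp [amin]
  | cons j js ih =>
    simp only [amin, List.map_cons, List.foldl_cons, List.getD_cons_succ]
    cases hb : lt (r.getD j 0) (r.getD m 0) with
    | true => rw [if_pos rfl, if_pos rfl]; exact ih j
    | false => rw [if_neg (by simp), if_neg (by simp)]; exact ih m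

theorem sstep_shift (lt : Int → Int → Bool) (v : Int) (r : List Int) (i : Nat) :
    sstep lt (v :: r) (i + 1) = v :: sstep lt r i := by
  have hlen : (v :: r).length - (i + 1 + 1) = r.length - (i + 1) := by simp
  have hr : List.range' (i + 1 + 1) ((v :: r).length - (i + 1 + 1)) =
      (List.range' (i + 1) (r.length - (i + 1))).map (· + 1) := by
    rw [hlen, range'_shift]
  show ((v :: r).set (i+1) ((v :: r).getD (amin lt (v :: r) (i+1)
      (List.range' (i+1+1) ((v :: r).length - (i+1+1)))) 0)).set
      (amin lt (v :: r) (i+1) (List.range' (i+1+1) ((v :: r).length - (i+1+1))))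
      ((v :: r).getD (i+1) 0) = v :: sstep lt r i
  rw [hr, amin_shift]
  simp [sstep, List.set_cons_succ]

theorem foldl_sstep_shift (lt : Int → Int → Bool) (js : List Nat) :
    ∀ (v : Int) (r : List Int),
    (js.map (· + 1)).foldl (sstep lt) (v :: r) = v :: js.foldl (sstep lt) r := by
  induction js with
  | nil => intro v r; simp
  | cons j js ih => intro v r; simp only [List.map_cons, List.foldl_cons, sstep_shift]; exact ih v _

theorem set_perm (t : List Int) (k : Nat) (h : Int) (hk : k < t.length) :
    (t.getD k 0 :: t.set k h).Perm (h :: t) := by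
  rw [List.getD_eq_getElem t 0 hk, List.set_eq_take_cons_drop h hk]
  have h1 : (List.take k t ++ h :: List.drop (k + 1) t).Perm
      (h :: (List.take k t ++ List.drop (k + 1) t)) := List.perm_middle
  have h2 : (t[k] :: (List.take k t ++ h :: List.drop (k + 1) t)).Perm
      (t[k] :: h :: (List.take k t ++ List.drop (k + 1) t)) := h1.cons _
  have h3 : (t[k] :: h :: (List.take k t ++ List.drop (k + 1) t)).Perm
      (h :: t[k] :: (List.take k t ++ List.drop (k + 1) t)) := List.Perm.swap _ _ _
  have h4 : (t[k] :: (List.take k t ++ List.drop (k + 1) t)).Perm t := by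
    have := @List.perm_middle _ t[k] (List.take k t) (List.drop (k + 1) t)
    have ht : List.take k t ++ t[k] :: List.drop (k + 1) t = t := by
      rw [List.cons_getElem_drop_succ, List.take_append_drop]
    exact (ht ▸ this).symm
  exact (h2.trans h3).trans (h4.cons h)

theorem spass_cons_eq (lt : Int → Int → Bool) (h v : Int) (t r : List Int)
    (hst : sstep lt (h :: t) 0 = v :: r) (hlen : r.length = t.length) :
    spass lt (h :: t) = v :: spass lt r := by
  cases t with
  | nil =>
    have hse : sstep lt [h] 0 = [h] := by simp [sstep, amin]
    rw [hse] at hst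
    cases r with
    | nil =>
      have hv : h = v := by simpa using hst
      subst hv
      simp [spass]
    | cons a b => simp at hst
  | cons x t' =>
    have hL : (h :: x :: t').length - 1 = t'.length + 1 := by simp
    have hr : r.length - 1 = t'.length := by simp [hlen]
    unfold spass
    rw [hL, hr, List.range'_succ, List.foldl_cons, hst, range'_shift, foldl_sstep_shift]

theorem peel_main (lt : Int → Int → Bool)
    (hirr : ∀ x, lt x x = false)
    (h2 : ∀ x y z, lt x y = true → lt x z = false → lt y z = false)
    (h3 : ∀ x y z, lt x y = false → lt y z = false → lt x z = false)
    (h : Int) (t : List Int) :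
    ∃ v r, r.length = t.length ∧ spass lt (h :: t) = v :: spass lt r ∧
      (v :: r).Perm (h :: t) ∧ (∀ y ∈ h :: t, lt y v = false) := by
  have hlen0 : (h :: t).length - (0 + 1) = t.length := by simp
  obtain ⟨m, hmdef⟩ : ∃ mm, mm = amin lt (h :: t) 0 (List.range' 1 t.length) := ⟨_, rfl⟩
  have hm : m ∈ 0 :: List.range' 1 t.length := by rw [hmdef]; exact amin_mem ..
  have hmin : ∀ j ∈ 0 :: List.range' 1 t.length,
      lt ((h :: t).getD j 0) ((h :: t).getD m 0) = false := by
    rw [hmdef]; exact amin_min lt (h :: t) hirr h2 h3 0 (List.range' 1 t.length)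
  have hst0 : sstep lt (h :: t) 0 =
      ((h :: t).set 0 ((h :: t).getD m 0)).set m h := by
    show ((h :: t).set 0 ((h :: t).getD (amin lt (h :: t) 0
        (List.range' (0+1) ((h :: t).length - (0+1)))) 0)).set
        (amin lt (h :: t) 0 (List.range' (0+1) ((h :: t).length - (0+1))))
        ((h :: t).getD 0 0) = _
    rw [hlen0, ← hmdef]
    rfl
  have hmle : m ≤ t.length := by
    rcases List.mem_cons.mp hm with h1 | h1
    · omega
    · have := List.mem_range'_1.mp h1; omega
  have hminall : ∀ y ∈ h :: t, lt y ((h :: t).getD m 0) = false := by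
    intro y hy
    obtain ⟨j, hj, rfl⟩ := List.getElem_of_mem hy
    have hjmem : j ∈ 0 :: List.range' 1 t.length := by
      rcases Nat.eq_zero_or_pos j with rfl | hj0
      · exact List.mem_cons_self ..
      · exact List.mem_cons.mpr (Or.inr (List.mem_range'_1.mpr (by simp at hj; omega)))
    have := hmin j hjmem
    rwa [List.getD_eq_getElem (h :: t) 0 hj] at this
  clear hmdef hm hmin
  cases m with
  | zero =>
    refine ⟨h, t, rfl, ?_, List.Perm.refl _, ?_⟩
    · apply spass_cons_eq lt h h t t _ rfl
      rw [hst0]; simp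
    · simpa using hminall
  | succ k =>
    have hk : k < t.length := by omega
    refine ⟨t.getD k 0, t.set k h, by simp, ?_, set_perm t k h hk, ?_⟩
    · apply spass_cons_eq lt h _ t _ _ (by simp)
      rw [hst0]
      simp [List.set_cons_succ]
    · simpa [List.getD_cons_succ] using hminall

theorem spass_perm (lt : Int → Int → Bool)
    (hirr : ∀ x, lt x x = false)
    (h2 : ∀ x y z, lt x y = true → lt x z = false → lt y z = false)
    (h3 : ∀ x y z, lt x y = false → lt y z = false → lt x z = false)
    (a : List Int) : (spass lt a).Perm a := by
  have main : ∀ (n : Nat) (a : List Int), a.length = n → (spass lt a).Perm a := by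
    intro n
    induction n using Nat.strong_induction_on with
    | _ n ih =>
      intro a hlen
      cases a with
      | nil => simp [spass]
      | cons h t =>
        obtain ⟨v, r, hlr, hsp, hperm, _⟩ := peel_main lt hirr h2 h3 h t
        rw [hsp]
        have hrn : r.length < n := by simp at hlen; omega
        exact ((ih r.length hrn r rfl).cons v).trans hperm
  exact main a.length a rfl

theorem spass_pairwise (lt : Int → Int → Bool)
    (hirr : ∀ x, lt x x = false)
    (h2 : ∀ x y z, lt x y = true → lt x z = false → lt y z = false)
    (h3 : ∀ x y z, lt x y = false → lt y z = false → lt x z = false)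
    (a : List Int) : (spass lt a).Pairwise (fun x y => lt y x = false) := by
  have main : ∀ (n : Nat) (a : List Int), a.length = n →
      (spass lt a).Pairwise (fun x y => lt y x = false) := by
    intro n
    induction n using Nat.strong_induction_on with
    | _ n ih =>
      intro a hlen
      cases a with
      | nil => simp [spass]
      | cons h t =>
        obtain ⟨v, r, hlr, hsp, hperm, hmin⟩ := peel_main lt hirr h2 h3 h t
        rw [hsp]
        have hrn : r.length < n := by simp at hlen; omega
        refine List.Pairwise.cons ?_ (ih r.length hrn r rfl)
        intro y hy
        have hyr : y ∈ r := ((spass_perm lt hirr h2 h3 r).mem_iff).mp hy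
        exact hmin y (hperm.subset (List.mem_cons.mpr (Or.inr hyr)))
  exact main a.length a rfl

theorem getD_mid (pre seg post : List Int) (t : Nat) (ht : t < seg.length) :
    (pre ++ seg ++ post).getD (pre.length + t) 0 = seg.getD t 0 := by
  rw [List.append_assoc, List.getD_append_right (pre) (seg ++ post) 0 (pre.length + t) (by omega)]
  have : pre.length + t - pre.length = t := by omega
  rw [this, List.getD_append seg post 0 t ht]

theorem set_mid (pre seg post : List Int) (t : Nat) (ht : t < seg.length) (v : Int) :
    (pre ++ seg ++ post).set (pre.length + t) v = pre ++ seg.set t v ++ post := by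
  rw [List.append_assoc, List.set_append_right (pre.length + t) v (by omega)]
  have : pre.length + t - pre.length = t := by omega
  rw [this, List.set_append_left t v ht, List.append_assoc]

theorem length_sstep (cmp : Int → Int → Bool) (a : List Int) (i : Nat) :
    (sstep cmp a i).length = a.length := by
  simp [sstep]

theorem length_foldl_sstep (cmp : Int → Int → Bool) (ks : List Nat) :
    ∀ (seg : List Int), (ks.foldl (sstep cmp) seg).length = seg.length := by
  induction ks with
  | nil => intro seg; rfl
  | cons k ks ih => intro seg; rw [List.foldl_cons, ih, length_sstep]

theorem inner_bridge (cmp : Int → Int → Bool) (full seg : List Int) (off : Nat)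
    (hread : ∀ t, t < seg.length → full.getD (off + t) 0 = seg.getD t 0)
    (js : List Nat) :
    ∀ (m : Nat), m < seg.length → (∀ j ∈ js, j < seg.length) →
    js.foldl (fun (mi : Int) (j : Nat) =>
        if cmp (PySem.List.pyGetD full ((off + j : Nat) : Int) 0)
               (PySem.List.pyGetD full mi 0)
        then ((off + j : Nat) : Int) else mi) ((off + m : Nat) : Int)
    = ((off + amin cmp seg m js : Nat) : Int) := by
  induction js with
  | nil => intro m _ _; simp [amin]
  | cons j js ih =>
    intro m hm hjs
    have hj : j < seg.length := hjs j (List.mem_cons_self ..)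
    have h1 : PySem.List.pyGetD full ((off + j : Nat) : Int) 0 = seg.getD j 0 := by
      rw [PySem.List.pyGetD_natCast]; exact hread j hj
    have h2 : PySem.List.pyGetD full ((off + m : Nat) : Int) 0 = seg.getD m 0 := by
      rw [PySem.List.pyGetD_natCast]; exact hread m hm
    simp only [List.foldl_cons, h1, h2, amin]
    cases hb : cmp (seg.getD j 0) (seg.getD m 0) with
    | true =>
      rw [if_pos rfl, if_pos rfl]
      exact ih j hj (fun x hx => hjs x (List.mem_cons.mpr (Or.inr hx)))
    | false =>
      rw [if_neg (by simp), if_neg (by simp)]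
      exact ih m hm (fun x hx => hjs x (List.mem_cons.mpr (Or.inr hx)))

theorem outer_bridge (cmp : Int → Int → Bool) (pre post : List Int) (off L : Nat) (B : Int)
    (hoff : off = pre.length) (hB : B = ((off + L : Nat) : Int)) (ks : List Nat) :
    ∀ (seg : List Int), seg.length = L → (∀ k ∈ ks, k < L) →
    (ks.map (fun k : Nat => ((off + k : Nat) : Int))).foldl
      (fun a i =>
        let m := (PySem.List.pyRange (i + 1) B 1).foldl
          (fun mi j => if cmp (PySem.List.pyGetD a j 0) (PySem.List.pyGetD a mi 0)
                       then j else mi) i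
        PySem.List.pySetD (PySem.List.pySetD a i (PySem.List.pyGetD a m 0)) m
          (PySem.List.pyGetD a i 0))
      (pre ++ seg ++ post)
    = pre ++ ks.foldl (sstep cmp) seg ++ post := by
  induction ks with
  | nil => intro seg _ _; rfl
  | cons k ks ih =>
    intro seg hlen hks
    have hk : k < seg.length := by rw [hlen]; exact hks k (List.mem_cons_self ..)
    simp only [List.map_cons, List.foldl_cons]
    -- one step
    have hstep :
        (let m := (PySem.List.pyRange (((off + k : Nat) : Int) + 1) B 1).foldl
            (fun mi j => if cmp (PySem.List.pyGetD (pre ++ seg ++ post) j 0)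
                              (PySem.List.pyGetD (pre ++ seg ++ post) mi 0)
                         then j else mi) ((off + k : Nat) : Int)
         PySem.List.pySetD (PySem.List.pySetD (pre ++ seg ++ post) ((off + k : Nat) : Int)
            (PySem.List.pyGetD (pre ++ seg ++ post) m 0)) m
            (PySem.List.pyGetD (pre ++ seg ++ post) ((off + k : Nat) : Int) 0))
        = pre ++ sstep cmp seg k ++ post := by
      have hread : ∀ t, t < seg.length →
          (pre ++ seg ++ post).getD (off + t) 0 = seg.getD t 0 := by
        intro t ht; rw [hoff]; exact getD_mid pre seg post t ht
      -- inner index list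
      set js : List Nat := List.range' (k + 1) (seg.length - (k + 1)) with hjs
      have hjsbound : ∀ j ∈ js, j < seg.length := by
        intro j hj; have := List.mem_range'_1.mp hj; omega
      have hrange : PySem.List.pyRange (((off + k : Nat) : Int) + 1) B 1 =
          js.map (fun j : Nat => ((off + j : Nat) : Int)) := by
        rw [PySem.List.pyRange_one, hB]
        have hc : (((off + L : Nat) : Int) - (((off + k : Nat) : Int) + 1)).toNat
            = seg.length - (k + 1) := by omega
        rw [hc, hjs, List.range'_eq_map_range, List.map_map]
        apply List.map_congr_left
        intro x _
        simp
        ring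
      rw [hrange, List.foldl_map]
      have hinner := inner_bridge cmp (pre ++ seg ++ post) seg off hread js k hk hjsbound
      simp only [hinner]
      -- now the swap
      have hmlt : amin cmp seg k js < seg.length := by
        have := amin_mem cmp seg k js
        rcases List.mem_cons.mp this with h1 | h1
        · omega
        · exact hjsbound _ h1
      have hg1 : PySem.List.pyGetD (pre ++ seg ++ post) ((off + amin cmp seg k js : Nat) : Int) 0
          = seg.getD (amin cmp seg k js) 0 := by
        rw [PySem.List.pyGetD_natCast]; exact hread _ hmlt
      have hg2 : PySem.List.pyGetD (pre ++ seg ++ post) ((off + k : Nat) : Int) 0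
          = seg.getD k 0 := by
        rw [PySem.List.pyGetD_natCast]; exact hread _ hk
      rw [hg1, hg2]
      rw [PySem.List.pySetD_natCast, PySem.List.pySetD_natCast, hoff]
      rw [set_mid pre seg post k hk]
      rw [set_mid pre _ post _ (by simpa using hmlt) _]
      rfl
    rw [hstep]
    have := ih (sstep cmp seg k) (by rw [length_sstep, hlen])
        (fun x hx => hks x (List.mem_cons.mpr (Or.inr hx)))
    rw [this]

theorem main_bridge (xs ys : List Int) (hsplit : (xs.length + ys.length) / 2 = xs.length) :
    sort_half (xs ++ ys) = spass ltAsc xs ++ spass ltDesc ys := by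
  simp only [sort_half]
  have hfd : PySem.Int.floordiv (((xs ++ ys).length : Nat) : Int) 2 = (xs.length : Int) := by
    rw [PySem.Int.floordiv_eq_ediv_of_pos (by norm_num)]
    simp only [List.length_append]
    omega
  rw [hfd]
  have hrange1 : PySem.List.pyRange 0 ((xs.length : Int) - 1) 1 =
      (List.range' 0 (xs.length - 1)).map (fun k : Nat => ((0 + k : Nat) : Int)) := by
    rw [PySem.List.pyRange_one]
    have hc : ((xs.length : Int) - 1 - 0).toNat = xs.length - 1 := by omega
    rw [hc, List.range_eq_range']
    apply List.map_congr_left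
    intro x _
    push_cast
    ring
  rw [hrange1]
  have e1 := outer_bridge ltAsc [] ys 0 xs.length ((xs.length : Nat) : Int) rfl
      (by push_cast; ring) (List.range' 0 (xs.length - 1)) xs rfl
      (by intro k hk; have := List.mem_range'_1.mp hk; omega)
  simp only [ltAsc, decide_eq_true_eq, List.nil_append] at e1
  rw [e1]
  have hfs : ((List.range' 0 (xs.length - 1)).foldl (sstep ltAsc) xs).length = xs.length :=
    length_foldl_sstep ltAsc _ xs
  have hrange2 : PySem.List.pyRange (xs.length : Int) ((((xs ++ ys).length : Nat) : Int) - 1) 1 =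
      (List.range' 0 (ys.length - 1)).map (fun k : Nat => ((xs.length + k : Nat) : Int)) := by
    rw [PySem.List.pyRange_one]
    have hc : ((((xs ++ ys).length : Nat) : Int) - 1 - (xs.length : Int)).toNat = ys.length - 1 := by
      simp only [List.length_append]; omega
    rw [hc, List.range_eq_range']
    apply List.map_congr_left
    intro x _
    push_cast
    ring
  rw [hrange2]
  have e2 := outer_bridge ltDesc ((List.range' 0 (xs.length - 1)).foldl (sstep ltAsc) xs) []
      xs.length ys.length (((xs ++ ys).length : Nat) : Int) hfs.symm
      (by simp [List.length_append]) (List.range' 0 (ys.length - 1)) ys rfl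
      (by intro k hk; have := List.mem_range'_1.mp hk; omega)
  simp only [ltDesc, decide_eq_true_eq, List.append_nil] at e2
  simp only [gt_iff_lt]
  rw [e2]
  rfl

theorem ltAsc_irr : ∀ x : Int, ltAsc x x = false := by intro x; simp [ltAsc]
theorem ltAsc_h2 : ∀ x y z : Int, ltAsc x y = true → ltAsc x z = false → ltAsc y z = false := by
  intro x y z; simp [ltAsc]; omega
theorem ltAsc_h3 : ∀ x y z : Int, ltAsc x y = false → ltAsc y z = false → ltAsc x z = false := by
  intro x y z; simp [ltAsc]; omega
theorem ltDesc_irr : ∀ x : Int, ltDesc x x = false := by intro x; simp [ltDesc]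
theorem ltDesc_h2 : ∀ x y z : Int, ltDesc x y = true → ltDesc x z = false → ltDesc y z = false := by
  intro x y z; simp [ltDesc]; omega
theorem ltDesc_h3 : ∀ x y z : Int, ltDesc x y = false → ltDesc y z = false → ltDesc x z = false := by
  intro x y z; simp [ltDesc]; omega

theorem sort_half_eq_spass (array : List Int) :
    sort_half array =
      spass ltAsc (array.take (array.length / 2)) ++
      spass ltDesc (array.drop (array.length / 2)) := by
  have hsplit : ((array.take (array.length / 2)).length +
      (array.drop (array.length / 2)).length) / 2 = (array.take (array.length / 2)).length := by
    simp only [List.length_take, List.length_drop]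
    omega
  have := main_bridge (array.take (array.length / 2)) (array.drop (array.length / 2)) hsplit
  rwa [List.take_append_drop] at this

theorem alt_eq (array : List Int) :
    sort_half_alt array =
      spass ltAsc (array.take (array.length / 2)) ++
      spass ltDesc (array.drop (array.length / 2)) := by
  simp only [sort_half_alt]
  have hfd : PySem.Int.floordiv (array.length : Int) 2 = ((array.length / 2 : Nat) : Int) := by
    exact_mod_cast PySem.Int.floordiv_natCast array.length 2
  rw [hfd, PySem.List.slice_to_natCast, PySem.List.slice_from_natCast]
  congr 1
  · apply PySem.List.sorted_id_eq_of_perm_of_pairwise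
    · exact spass_perm ltAsc ltAsc_irr ltAsc_h2 ltAsc_h3 _
    · exact (spass_pairwise ltAsc ltAsc_irr ltAsc_h2 ltAsc_h3 _).imp
        (fun h => by simp [ltAsc] at h; omega)
  · apply PySem.List.eq_of_perm_of_pairwise_le_of_injective (fun x : Int => -x) neg_injective
    · exact (PySem.List.sorted_perm ..).trans
        (spass_perm ltDesc ltDesc_irr ltDesc_h2 ltDesc_h3 _).symm
    · exact (PySem.List.sorted_pairwise_rev ..).imp (fun h => by simpa using h)
    · exact (spass_pairwise ltDesc ltDesc_irr ltDesc_h2 ltDesc_h3 _).imp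
        (fun h => by simp [ltDesc] at h; omega)


-- ===== VERDICT (by name: the statement is the Claim_ definition above) =====
theorem sort_half_spec : Claim_equal_sort_half := by
  intro array _
  unfold Spec_sort_half
  rw [sort_half_eq_spass, alt_eq]
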